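-- pv_equiv track=rewrite | github.com/Shivjeeva/website-builder | main.py | get_server_instructions
-- ===== SOURCE A (Python) =====
-- def get_server_instructions(user_query, conversation_history):
--     """Generate server instructions based on the project type and conversation history"""
--
--     query_lower = user_query.lower()
--
--     # Check for React/frontend projects
--     if any(word in query_lower for word in ['react', 'frontend', 'ui', 'component', 'todo']):
--         return """Your React app is ready! To run it:
-- 1. Navigate to your project directory
-- 2. Run: npm install (if not already done)
-- 3. Run: npm start
-- 4. Open http://localhost:3000 in your browser"""
--
--     # Check for Python/FastAPI projects
--     elif any(word in query_lower for word in ['fastapi', 'api', 'backend']):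
--         return """Your FastAPI backend is ready! To run it:
-- 1. Navigate to your project directory
-- 2. Run: pip install fastapi uvicorn
-- 3. Run: uvicorn main:app --reload
-- 4. Open http://localhost:8000 in your browser
-- 5. API docs at http://localhost:8000/docs"""
--
--     # Check for Django projects
--     elif any(word in query_lower for word in ['django', 'admin']):
--         return """Your Django project is ready! To run it:
-- 1. Navigate to your project directory
-- 2. Run: pip install django
-- 3. Run: python manage.py migrate
-- 4. Run: python manage.py runserver
-- 5. Open http://localhost:8000 in your browser"""
--
--     # Check for Node.js projects
--     elif any(word in query_lower for word in ['node', 'express', 'javascript']):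
--         return """Your Node.js project is ready! To run it:
-- 1. Navigate to your project directory
-- 2. Run: npm install
-- 3. Run: npm start (or node app.js)
-- 4. Check the console output for the server URL"""
--
--     # Check for full-stack projects
--     elif any(word in query_lower for word in ['fullstack', 'full-stack', 'both frontend and backend']):
--         return """Your full-stack app is ready! To run it:
-- 1. Backend: Navigate to backend directory and run the server
-- 2. Frontend: Navigate to frontend directory and run npm start
-- 3. Check the console output for server URLs"""
--
--     # Check for Python scripts
--     elif any(word in query_lower for word in ['python', 'script', 'calculator']):
--         return """Your Python script is ready! To run it:
-- 1. Navigate to your project directory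
-- 2. Run: python your_script.py
-- 3. Check the console output for results"""
--
--     # Generic instructions
--     else:
--         return """Your project is ready! Check the files created above and run the appropriate commands to start your application."""
-- ===== SOURCE B (Python) =====
-- # B: a flat keyword -> priority map plus a min-reduction replaces A's ordered
-- # if/elif group checks: every keyword is tested once, the smallest priority of
-- # any matching keyword selects the instruction text.
-- KEYWORD_PRIORITY = {
--     'react': 0, 'frontend': 0, 'ui': 0, 'component': 0, 'todo': 0,
--     'fastapi': 1, 'api': 1, 'backend': 1,
--     'django': 2, 'admin': 2,
--     'node': 3, 'express': 3, 'javascript': 3,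
--     'fullstack': 4, 'full-stack': 4, 'both frontend and backend': 4,
--     'python': 5, 'script': 5, 'calculator': 5,
-- }
--
-- INSTRUCTIONS = [
--     """Your React app is ready! To run it:
-- 1. Navigate to your project directory
-- 2. Run: npm install (if not already done)
-- 3. Run: npm start
-- 4. Open http://localhost:3000 in your browser""",
--     """Your FastAPI backend is ready! To run it:
-- 1. Navigate to your project directory
-- 2. Run: pip install fastapi uvicorn
-- 3. Run: uvicorn main:app --reload
-- 4. Open http://localhost:8000 in your browser
-- 5. API docs at http://localhost:8000/docs""",
--     """Your Django project is ready! To run it: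
-- 1. Navigate to your project directory
-- 2. Run: pip install django
-- 3. Run: python manage.py migrate
-- 4. Run: python manage.py runserver
-- 5. Open http://localhost:8000 in your browser""",
--     """Your Node.js project is ready! To run it:
-- 1. Navigate to your project directory
-- 2. Run: npm install
-- 3. Run: npm start (or node app.js)
-- 4. Check the console output for the server URL""",
--     """Your full-stack app is ready! To run it:
-- 1. Backend: Navigate to backend directory and run the server
-- 2. Frontend: Navigate to frontend directory and run npm start
-- 3. Check the console output for server URLs""",
--     """Your Python script is ready! To run it:
-- 1. Navigate to your project directory
-- 2. Run: python your_script.py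
-- 3. Check the console output for results""",
-- ]
--
-- DEFAULT = """Your project is ready! Check the files created above and run the appropriate commands to start your application."""
--
--
-- def get_server_instructions(user_query, conversation_history):
--     query_lower = user_query.lower()
--     hits = [prio for kw, prio in KEYWORD_PRIORITY.items() if kw in query_lower]
--     return INSTRUCTIONS[min(hits)] if hits else DEFAULT
-- ===== Notes on version B (the rewrite author's own statement) =====
-- stated objective: alternative
-- what changed: A's ordered if-elif group checks are replaced by a single flat keyword->priority map: B collects the priorities of all matching keywords in one comprehension and returns the instruction at the minimum priority (correct because the priorities mirror the branch order, so the minimum matching priority is exactly A's first firing branch), with the generic text when nothing matches.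
import Mathlib
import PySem

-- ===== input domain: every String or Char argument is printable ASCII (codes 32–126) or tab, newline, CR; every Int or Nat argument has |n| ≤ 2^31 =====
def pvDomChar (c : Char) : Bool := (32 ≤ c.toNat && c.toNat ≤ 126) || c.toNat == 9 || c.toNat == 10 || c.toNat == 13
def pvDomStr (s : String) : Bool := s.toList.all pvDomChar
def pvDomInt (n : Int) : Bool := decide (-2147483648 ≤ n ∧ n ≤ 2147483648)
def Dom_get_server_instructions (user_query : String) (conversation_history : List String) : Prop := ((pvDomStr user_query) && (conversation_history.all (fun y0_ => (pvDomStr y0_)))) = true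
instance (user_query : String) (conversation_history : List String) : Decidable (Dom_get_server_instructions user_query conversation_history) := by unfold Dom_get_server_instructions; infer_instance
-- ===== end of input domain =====

-- B replaces A's ordered if-elif keyword-group chain by a flat keyword->priority map with a
-- min-reduction over the priorities of all matching keywords (alternative decomposition, same cost).

-- ===== PORT A =====
def get_server_instructions (user_query : String) (conversation_history : List String) : String :=
  let query_lower := PySem.Str.lower user_query
  if (["react", "frontend", "ui", "component", "todo"] : List String).any (fun word => PySem.Str.isIn word query_lower) then
    "Your React app is ready! To run it:\n1. Navigate to your project directory\n2. Run: npm install (if not already done)\n3. Run: npm start\n4. Open http://localhost:3000 in your browser"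
  else
  if (["fastapi", "api", "backend"] : List String).any (fun word => PySem.Str.isIn word query_lower) then
    "Your FastAPI backend is ready! To run it:\n1. Navigate to your project directory\n2. Run: pip install fastapi uvicorn\n3. Run: uvicorn main:app --reload\n4. Open http://localhost:8000 in your browser\n5. API docs at http://localhost:8000/docs"
  else
  if (["django", "admin"] : List String).any (fun word => PySem.Str.isIn word query_lower) then
    "Your Django project is ready! To run it:\n1. Navigate to your project directory\n2. Run: pip install django\n3. Run: python manage.py migrate\n4. Run: python manage.py runserver\n5. Open http://localhost:8000 in your browser"
  else
  if (["node", "express", "javascript"] : List String).any (fun word => PySem.Str.isIn word query_lower) then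
    "Your Node.js project is ready! To run it:\n1. Navigate to your project directory\n2. Run: npm install\n3. Run: npm start (or node app.js)\n4. Check the console output for the server URL"
  else
  if (["fullstack", "full-stack", "both frontend and backend"] : List String).any (fun word => PySem.Str.isIn word query_lower) then
    "Your full-stack app is ready! To run it:\n1. Backend: Navigate to backend directory and run the server\n2. Frontend: Navigate to frontend directory and run npm start\n3. Check the console output for server URLs"
  else
  if (["python", "script", "calculator"] : List String).any (fun word => PySem.Str.isIn word query_lower) then
    "Your Python script is ready! To run it:\n1. Navigate to your project directory\n2. Run: python your_script.py\n3. Check the console output for results"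
  else
    "Your project is ready! Check the files created above and run the appropriate commands to start your application."

-- ===== PORT B =====
def pvKeywordPriority : List (String × Nat) := [
  ("react", 0), ("frontend", 0), ("ui", 0), ("component", 0), ("todo", 0),
  ("fastapi", 1), ("api", 1), ("backend", 1),
  ("django", 2), ("admin", 2),
  ("node", 3), ("express", 3), ("javascript", 3),
  ("fullstack", 4), ("full-stack", 4), ("both frontend and backend", 4),
  ("python", 5), ("script", 5), ("calculator", 5)]

def pvInstructions : List String := [
  "Your React app is ready! To run it:\n1. Navigate to your project directory\n2. Run: npm install (if not already done)\n3. Run: npm start\n4. Open http://localhost:3000 in your browser",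
  "Your FastAPI backend is ready! To run it:\n1. Navigate to your project directory\n2. Run: pip install fastapi uvicorn\n3. Run: uvicorn main:app --reload\n4. Open http://localhost:8000 in your browser\n5. API docs at http://localhost:8000/docs",
  "Your Django project is ready! To run it:\n1. Navigate to your project directory\n2. Run: pip install django\n3. Run: python manage.py migrate\n4. Run: python manage.py runserver\n5. Open http://localhost:8000 in your browser",
  "Your Node.js project is ready! To run it:\n1. Navigate to your project directory\n2. Run: npm install\n3. Run: npm start (or node app.js)\n4. Check the console output for the server URL",
  "Your full-stack app is ready! To run it:\n1. Backend: Navigate to backend directory and run the server\n2. Frontend: Navigate to frontend directory and run npm start\n3. Check the console output for server URLs",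
  "Your Python script is ready! To run it:\n1. Navigate to your project directory\n2. Run: python your_script.py\n3. Check the console output for results"]

def pvDefaultInstructions : String := "Your project is ready! Check the files created above and run the appropriate commands to start your application."

-- INSTRUCTIONS[min(hits)] is ported with getD: every priority in the table is < pvInstructions.length,
-- so the Python index never raises and getD's default is unreachable.
def get_server_instructions_alt (user_query : String) (conversation_history : List String) : String :=
  let query_lower := PySem.Str.lower user_query
  let hits := pvKeywordPriority.filterMap (fun p => if PySem.Str.isIn p.1 query_lower then some p.2 else none)
  match PySem.List.min? hits (fun x => x) with
  | some m => pvInstructions.getD m pvDefaultInstructions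
  | none => pvDefaultInstructions

-- ===== PRECONDITION & SPEC =====
def Spec_get_server_instructions (user_query : String) (conversation_history : List String) (out : String) : Prop := out = get_server_instructions_alt user_query conversation_history
instance (user_query : String) (conversation_history : List String) (out : String) : Decidable (Spec_get_server_instructions user_query conversation_history out) := by unfold Spec_get_server_instructions; infer_instance

-- ===== CLAIM (what is proved, stated in full; the proofs are below) =====
def Claim_equal_get_server_instructions : Prop := ∀ (user_query : String) (conversation_history : List String), Dom_get_server_instructions user_query conversation_history → Spec_get_server_instructions user_query conversation_history (get_server_instructions user_query conversation_history)

-- ===== LEMMAS AND PROOFS =====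

-- min over Nat identity key is k when k is a member and a lower bound
theorem pv_min_pin (hits : List Nat) (k : Nat) (hk : k ∈ hits)
    (hall : ∀ x ∈ hits, k ≤ x) : PySem.List.min? hits (fun x => x) = some k := by
  cases h : PySem.List.min? hits (fun x => x) with
  | none =>
      rw [PySem.List.min?_eq_none_iff] at h
      simp [h] at hk
  | some m =>
      have hm := PySem.List.min?_mem h
      have h1 : m ≤ k := by simpa using PySem.List.min?_isMin h k hk
      have h2 := hall m hm
      exact congrArg some (Nat.le_antisymm h1 h2)


theorem pv_mem_hits (ql w : String) (i : Nat) (hw : (w, i) ∈ pvKeywordPriority)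
    (ht : PySem.Str.isIn w ql = true) :
    i ∈ pvKeywordPriority.filterMap (fun p => if PySem.Str.isIn p.1 ql then some p.2 else none) :=
  List.mem_filterMap.mpr ⟨(w, i), hw, by simp only [ht]; rfl⟩

theorem pv_hits_lb (ql : String) (k : Nat)
    (hfalse : ∀ p ∈ pvKeywordPriority, p.2 < k → PySem.Str.isIn p.1 ql = false) :
    ∀ x ∈ pvKeywordPriority.filterMap (fun p => if PySem.Str.isIn p.1 ql then some p.2 else none), k ≤ x := by
  intro x hx
  rw [List.mem_filterMap] at hx
  obtain ⟨p, hp, hfp⟩ := hx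
  by_cases hlt : p.2 < k
  · have hf := hfalse p hp hlt
    simp only [PySem.Str.isIn_eq] at hf
    simp [hf] at hfp
  · simp at hfp
    omega

-- ===== VERDICT (by name: the statement is the Claim_ definition above) =====
theorem get_server_instructions_spec : Claim_equal_get_server_instructions := by
  intro user_query conversation_history _
  unfold Spec_get_server_instructions
  simp only [get_server_instructions, get_server_instructions_alt]
  generalize PySem.Str.lower user_query = ql
  by_cases h0 : (["react", "frontend", "ui", "component", "todo"] : List String).any (fun word => PySem.Str.isIn word ql) = true
  · rw [if_pos h0]
    obtain ⟨w, hwmem, hwt⟩ := List.any_eq_true.mp h0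
    rw [pv_min_pin _ 0 (pv_mem_hits ql w 0 (by fin_cases hwmem <;> decide) hwt)
      (pv_hits_lb ql 0 (by intro p hp hlt; omega))]
    rfl
  · rw [if_neg h0]
    by_cases h1 : (["fastapi", "api", "backend"] : List String).any (fun word => PySem.Str.isIn word ql) = true
    · rw [if_pos h1]
      obtain ⟨w, hwmem, hwt⟩ := List.any_eq_true.mp h1
      rw [pv_min_pin _ 1 (pv_mem_hits ql w 1 (by fin_cases hwmem <;> decide) hwt)
        (pv_hits_lb ql 1 (by intro p hp hlt; fin_cases hp <;> simp_all))]
      rfl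
    · rw [if_neg h1]
      by_cases h2 : (["django", "admin"] : List String).any (fun word => PySem.Str.isIn word ql) = true
      · rw [if_pos h2]
        obtain ⟨w, hwmem, hwt⟩ := List.any_eq_true.mp h2
        rw [pv_min_pin _ 2 (pv_mem_hits ql w 2 (by fin_cases hwmem <;> decide) hwt)
          (pv_hits_lb ql 2 (by intro p hp hlt; fin_cases hp <;> simp_all))]
        rfl
      · rw [if_neg h2]
        by_cases h3 : (["node", "express", "javascript"] : List String).any (fun word => PySem.Str.isIn word ql) = true
        · rw [if_pos h3]
          obtain ⟨w, hwmem, hwt⟩ := List.any_eq_true.mp h3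
          rw [pv_min_pin _ 3 (pv_mem_hits ql w 3 (by fin_cases hwmem <;> decide) hwt)
            (pv_hits_lb ql 3 (by intro p hp hlt; fin_cases hp <;> simp_all))]
          rfl
        · rw [if_neg h3]
          by_cases h4 : (["fullstack", "full-stack", "both frontend and backend"] : List String).any (fun word => PySem.Str.isIn word ql) = true
          · rw [if_pos h4]
            obtain ⟨w, hwmem, hwt⟩ := List.any_eq_true.mp h4
            rw [pv_min_pin _ 4 (pv_mem_hits ql w 4 (by fin_cases hwmem <;> decide) hwt)
              (pv_hits_lb ql 4 (by intro p hp hlt; fin_cases hp <;> simp_all))]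
            rfl
          · rw [if_neg h4]
            by_cases h5 : (["python", "script", "calculator"] : List String).any (fun word => PySem.Str.isIn word ql) = true
            · rw [if_pos h5]
              obtain ⟨w, hwmem, hwt⟩ := List.any_eq_true.mp h5
              rw [pv_min_pin _ 5 (pv_mem_hits ql w 5 (by fin_cases hwmem <;> decide) hwt)
                (pv_hits_lb ql 5 (by intro p hp hlt; fin_cases hp <;> simp_all))]
              rfl
            · rw [if_neg h5]
              rw [show (pvKeywordPriority.filterMap (fun p => if PySem.Str.isIn p.1 ql then some p.2 else none)) = [] from by
                rw [List.filterMap_eq_nil_iff]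
                intro p hp
                fin_cases hp <;> simp_all]
              rfl
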